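-- pv_equiv track=rewrite | github.com/iamhardikat11/CP | CodeChef/November LunchTime 2021/EXPWEI.py | calculate
-- ===== SOURCE A (Python) =====
-- def calculate(p, q):
--
--     mod = 998244353
--     expo = 0
--     expo = mod - 2
--
--     # Loop to find the value
--     # until the expo is not zero
--     while (expo):
--
--         # Multiply p with q
--         # if expo is odd
--         if (expo & 1):
--             p = (p * q) % mod
--         q = (q * q) % mod
--
--         # Reduce the value of
--         # expo by 2
--         expo >>= 1
--
--     return p
-- ===== SOURCE B (Python) =====
-- def calculate(p, q):
--     mod = 998244353
--
--     def power(base, exp):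
--         if exp == 0:
--             return 1
--         half = power(base, exp // 2)
--         sq = half * half % mod
--         return sq * base % mod if exp & 1 else sq
--
--     return (p * power(q, mod - 2)) % mod
-- ===== Notes on version B (the rewrite author's own statement) =====
-- stated objective: alternative
-- what changed: Replaced the iterative LSB-to-MSB square-and-multiply loop that mutates p and q with a recursive exponentiation-by-squaring helper power(base, exp) over exp//2, combining with p only once at the end via (p * power(q, mod-2)) % mod.
import Mathlib
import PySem

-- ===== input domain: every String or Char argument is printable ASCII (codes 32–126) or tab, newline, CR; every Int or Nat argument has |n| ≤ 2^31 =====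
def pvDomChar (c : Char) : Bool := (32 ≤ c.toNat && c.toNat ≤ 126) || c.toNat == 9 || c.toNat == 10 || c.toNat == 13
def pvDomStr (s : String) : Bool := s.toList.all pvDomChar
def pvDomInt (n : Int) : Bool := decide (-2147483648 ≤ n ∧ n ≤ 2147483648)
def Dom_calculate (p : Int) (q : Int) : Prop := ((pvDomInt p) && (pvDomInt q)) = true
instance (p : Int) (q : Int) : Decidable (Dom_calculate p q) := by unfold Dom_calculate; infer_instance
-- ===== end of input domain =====

-- B replaces A's iterative bit-scanning square-and-multiply (mutating p and q) with a
-- recursive exponentiation-by-squaring helper, multiplying by p only once at the end.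

-- ===== PORT A =====
-- A's while loop over expo (a nonnegative Python int: starts at mod-2, halves each step);
-- 'expo & 1' is expo % 2, 'expo >>= 1' is expo / 2 on Nat — exact for nonnegative ints.
def calcLoopA (expo : Nat) (p q : Int) : Int :=
  if h : expo = 0 then p
  else
    calcLoopA (expo / 2)
      (if expo % 2 = 1 then PySem.Int.mod (p * q) 998244353 else p)
      (PySem.Int.mod (q * q) 998244353)
  decreasing_by exact Nat.div_lt_self (Nat.pos_of_ne_zero h) one_lt_two

def calculate (p : Int) (q : Int) : Int :=
  calcLoopA (998244353 - 2) p q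

-- ===== PORT B =====
def powerB (base : Int) (exp : Nat) : Int :=
  if h : exp = 0 then 1
  else
    let half := powerB base (exp / 2)
    let sq := PySem.Int.mod (half * half) 998244353
    if exp % 2 = 1 then PySem.Int.mod (sq * base) 998244353 else sq
  decreasing_by exact Nat.div_lt_self (Nat.pos_of_ne_zero h) one_lt_two

def calculate_alt (p : Int) (q : Int) : Int :=
  PySem.Int.mod (p * powerB q (998244353 - 2)) 998244353

-- ===== PRECONDITION & SPEC =====
def Spec_calculate (p : Int) (q : Int) (out : Int) : Prop := out = calculate_alt p q
instance (p : Int) (q : Int) (out : Int) : Decidable (Spec_calculate p q out) := by unfold Spec_calculate; infer_instance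

-- ===== CLAIM (what is proved, stated in full; the proofs are below) =====
def Claim_equal_calculate : Prop := ∀ (p : Int) (q : Int), Dom_calculate p q → Spec_calculate p q (calculate p q)

-- ===== LEMMAS AND PROOFS =====

theorem pymod_emod (a : Int) : PySem.Int.mod a 998244353 = a % 998244353 :=
  PySem.Int.mod_eq_emod_of_pos (by norm_num)

theorem int_pow_emod (a m : Int) (n : Nat) : (a % m) ^ n % m = a ^ n % m := by
  induction n with
  | zero => simp
  | succ k ih =>
    rw [pow_succ, pow_succ, Int.mul_emod, ih, Int.emod_emod_of_dvd _ dvd_rfl, ← Int.mul_emod]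

theorem powerB_emod (base : Int) (e : Nat) :
    powerB base e % 998244353 = base ^ e % 998244353 := by
  induction e using Nat.strong_induction_on with
  | _ e ih =>
    rw [powerB]
    by_cases h : e = 0
    · simp [h]
    · simp only [h, dif_neg, not_false_iff, pymod_emod]
      have ih' := ih (e / 2) (Nat.div_lt_self (Nat.pos_of_ne_zero h) one_lt_two)
      have hsq : powerB base (e / 2) * powerB base (e / 2) % 998244353
          = base ^ (e / 2) * base ^ (e / 2) % 998244353 := by
        rw [Int.mul_emod, ih', ← Int.mul_emod]
      by_cases ho : e % 2 = 1
      · have he : e = e / 2 + e / 2 + 1 := by omega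
        simp only [ho, if_pos]
        rw [Int.emod_emod_of_dvd _ dvd_rfl, Int.mul_emod, Int.emod_emod_of_dvd _ dvd_rfl,
          hsq, ← Int.mul_emod]
        rw [show base ^ e = base ^ (e / 2) * base ^ (e / 2) * base by
          conv_lhs => rw [he]
          rw [pow_add, pow_add, pow_one]]
      · simp only [ho, if_neg, not_false_iff]
        rw [Int.emod_emod_of_dvd _ dvd_rfl, hsq]
        rw [show base ^ e = base ^ (e / 2) * base ^ (e / 2) by
          rw [← pow_add]; exact congrArg (base ^ ·) (by omega)]

theorem calcLoopA_eq (e : Nat) (he : 1 ≤ e) :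
    ∀ p q : Int, calcLoopA e p q = p * q ^ e % 998244353 := by
  induction e using Nat.strong_induction_on with
  | _ e ih =>
    intro p q
    rw [calcLoopA]
    have h0 : e ≠ 0 := by omega
    simp only [h0, dif_neg, not_false_iff, pymod_emod]
    by_cases h1 : e = 1
    · subst h1
      rw [calcLoopA]
      norm_num
    · have hd : 1 ≤ e / 2 := by omega
      have ih' := ih (e / 2) (Nat.div_lt_self (Nat.pos_of_ne_zero h0) one_lt_two) hd
      by_cases ho : e % 2 = 1
      · simp only [ho, if_pos]
        rw [ih']
        rw [Int.mul_emod, Int.emod_emod_of_dvd _ dvd_rfl, int_pow_emod, ← Int.mul_emod]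
        rw [show (q * q) ^ (e / 2) = q ^ (e / 2) * q ^ (e / 2) by rw [mul_pow]]
        rw [show p * q * (q ^ (e / 2) * q ^ (e / 2)) = p * (q ^ (e / 2) * q ^ (e / 2) * q) by ring]
        rw [show q ^ (e / 2) * q ^ (e / 2) * q = q ^ e by
          rw [← pow_add, ← pow_succ, show e / 2 + e / 2 + 1 = e by omega]]
      · simp only [ho, if_neg, not_false_iff]
        rw [ih']
        rw [Int.mul_emod, int_pow_emod, ← Int.mul_emod]
        rw [show (q * q) ^ (e / 2) = q ^ (e / 2 + e / 2) by rw [pow_add, mul_pow]]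
        rw [show e / 2 + e / 2 = e by omega]

-- ===== VERDICT (by name: the statement is the Claim_ definition above) =====
theorem calculate_spec : Claim_equal_calculate := by
  intro p q _
  unfold Spec_calculate calculate calculate_alt
  rw [calcLoopA_eq (998244353 - 2) (by norm_num) p q, pymod_emod,
    Int.mul_emod p (powerB q (998244353 - 2)), powerB_emod, ← Int.mul_emod]
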